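-- pv_equiv track=rewrite | github.com/98coco/cs30_fall2022 | comp sci lectures/Week 3, Lecture 1 (recursion & turtle) .py | dupList
-- ===== SOURCE A (Python) =====
-- def dupList(l):
--     if l == []:
--         return []
--     else:
--         head = l[0] #1
--         tail = l[1:] #2,3
--         recursiveResult = dupList(tail) # [2,2,3,3]
--         return [head, head] + recursiveResult
-- ===== SOURCE B (Python) =====
-- def dupList(l):
--     result = []
--     for x in l:
--         result.append(x)
--         result.append(x)
--     return result
-- ===== Notes on version B (the rewrite author's own statement) =====
-- stated objective: faster
-- what changed: Replaces the head/tail linear recursion (which slices the list and concatenates a fresh list at every level) with a single iterative pass appending each element twice to an accumulator.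
import Mathlib
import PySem

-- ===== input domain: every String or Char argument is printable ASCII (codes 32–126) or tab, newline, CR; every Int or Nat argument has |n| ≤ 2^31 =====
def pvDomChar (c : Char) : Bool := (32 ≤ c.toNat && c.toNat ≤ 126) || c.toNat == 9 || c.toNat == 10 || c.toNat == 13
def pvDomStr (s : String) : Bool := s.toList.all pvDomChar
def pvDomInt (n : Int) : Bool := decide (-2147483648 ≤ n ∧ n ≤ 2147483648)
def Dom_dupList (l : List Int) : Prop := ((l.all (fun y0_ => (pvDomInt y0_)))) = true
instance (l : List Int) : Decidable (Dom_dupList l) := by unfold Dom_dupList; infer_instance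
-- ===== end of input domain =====

-- B replaces A's head/tail recursion with one iterative pass over an accumulator (simpler decomposition).


-- ===== PORT A =====
-- A: if l == [] return []; else head = l[0], tail = l[1:], return [head, head] + dupList(tail)
def dupList (l : List Int) : List Int :=
  match l with
  | [] => []
  | head :: tail =>
      let recursiveResult := dupList tail
      [head, head] ++ recursiveResult

-- ===== PORT B =====
-- B: result = []; for x in l: result.append(x); result.append(x); return result
def dupList_alt (l : List Int) : List Int :=
  l.foldl (fun result x => result ++ [x] ++ [x]) []

-- ===== PRECONDITION & SPEC =====
def Spec_dupList (l : List Int) (out : List Int) : Prop := out = dupList_alt l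
instance (l : List Int) (out : List Int) : Decidable (Spec_dupList l out) := by unfold Spec_dupList; infer_instance

-- ===== CLAIM (what is proved, stated in full; the proofs are below) =====
def Claim_equal_dupList : Prop := ∀ (l : List Int), Dom_dupList l → Spec_dupList l (dupList l)

-- ===== LEMMAS AND PROOFS =====
theorem dupList_alt_acc (l : List Int) (acc : List Int) :
    l.foldl (fun result x => result ++ [x] ++ [x]) acc = acc ++ dupList l := by
  induction l generalizing acc with
  | nil => simp [dupList]
  | cons h t ih =>
      rw [List.foldl_cons, ih, dupList]
      simp

-- ===== VERDICT (by name: the statement is the Claim_ definition above) =====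
theorem dupList_spec : Claim_equal_dupList := by
  intro l _
  unfold Spec_dupList dupList_alt
  rw [dupList_alt_acc]
  simp
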